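-- pv_equiv track=rewrite | github.com/longedok/gcbot | src/main.py | _shorten_module_name
-- ===== SOURCE A (Python) =====
-- def _shorten_module_name(name: str) -> str:
--     parts = name.split(".")
--     if len(parts) > 1:
--         parts_short = []
--         for part in parts[:-1]:
--             parts_short.append(part[:1])
--         return ".".join(parts_short + parts[-1:])
--     return name
-- ===== SOURCE B (Python) =====
-- def _shorten_module_name(name: str) -> str:
--     # single left-to-right scan: emit first char of each dot-terminated run, copy dots,
--     # and copy the final dot-less tail verbatim
--     out = []
--     i = 0
--     n = len(name)
--     while i < n:
--         c = name[i]
--         if c == ".":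
--             out.append(".")
--             i += 1
--         else:
--             j = name.find(".", i + 1)
--             if j == -1:
--                 out.append(name[i:])
--                 break
--             out.append(c + ".")
--             i = j + 1
--     return "".join(out)
-- ===== Notes on version B (the rewrite author's own statement) =====
-- stated objective: alternative
-- what changed: B replaces A's split-on-dot / build-list-of-first-chars / join pipeline with a single left-to-right scan that copies dots, emits the first character of each dot-terminated run, and copies the final dot-less tail verbatim.
import Mathlib
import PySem

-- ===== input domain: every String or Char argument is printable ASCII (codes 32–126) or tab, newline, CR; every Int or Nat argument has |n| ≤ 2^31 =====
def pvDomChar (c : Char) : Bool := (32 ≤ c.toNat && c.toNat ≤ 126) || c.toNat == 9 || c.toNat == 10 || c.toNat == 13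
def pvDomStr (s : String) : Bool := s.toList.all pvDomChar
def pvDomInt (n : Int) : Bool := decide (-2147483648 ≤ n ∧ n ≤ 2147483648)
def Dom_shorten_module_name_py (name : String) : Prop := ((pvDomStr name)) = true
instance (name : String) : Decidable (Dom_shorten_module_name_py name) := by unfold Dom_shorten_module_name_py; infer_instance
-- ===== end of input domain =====

-- B replaces A's split/map-first-char/join pipeline with one left-to-right scan over the characters (alternative decomposition, same cost).

-- ===== PORT A =====
def shorten_module_name_py (name : String) : String :=
  let parts := PySem.Chars.splitOn name.toList ['.']
  if 1 < parts.length then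
    let parts_short := (PySem.List.slice parts none (some (-1))).foldl
      (fun acc part => acc ++ [PySem.List.slice part none (some 1)]) []
    String.ofList (PySem.Chars.join ['.'] (parts_short ++ PySem.List.slice parts (some (-1)) none))
  else name

-- ===== PORT B =====
-- the while loop of Source B as a list cursor: the suffix name[i:] is the argument;
-- name.find(".", i+1) = -1  ↔  rest.dropWhile (· ≠ '.') = []
def pvScan (l : List Char) : List Char :=
  match l with
  | [] => []
  | c :: rest =>
    if c = '.' then '.' :: pvScan rest
    else
      match h : rest.dropWhile (· ≠ '.') with
      | [] => c :: rest
      | _ :: rest' => c :: '.' :: pvScan rest'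
termination_by l.length
decreasing_by
· simp
· have hlen := List.length_dropWhile_le (p := fun x => decide (x ≠ '.')) (l := rest)
  rw [h] at hlen
  simp at hlen ⊢
  omega

def shorten_module_name_py_alt (name : String) : String :=
  String.ofList (pvScan name.toList)

-- ===== PRECONDITION & SPEC =====
def Spec_shorten_module_name_py (name : String) (out : String) : Prop := out = shorten_module_name_py_alt name
instance (name : String) (out : String) : Decidable (Spec_shorten_module_name_py name out) := by unfold Spec_shorten_module_name_py; infer_instance

-- ===== CLAIM (what is proved, stated in full; the proofs are below) =====
def Claim_equal_shorten_module_name_py : Prop := ∀ (name : String), Dom_shorten_module_name_py name → Spec_shorten_module_name_py name (shorten_module_name_py name)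

-- ===== LEMMAS AND PROOFS =====

-- structural characterisation of Python's split(".")
def pvSplitSpec : List Char → List (List Char)
  | [] => [[]]
  | c :: r =>
    if c = '.' then [] :: pvSplitSpec r
    else
      match pvSplitSpec r with
      | [] => [[c]]
      | x :: xs => (c :: x) :: xs

theorem pvSplitSpec_ne_nil (l : List Char) : pvSplitSpec l ≠ [] := by
  cases l with
  | nil => simp [pvSplitSpec]
  | cons c r =>
    simp only [pvSplitSpec]
    split_ifs
    · simp
    · cases h : pvSplitSpec r <;> simp

theorem pvSplitSpec_dot (r : List Char) : pvSplitSpec ('.' :: r) = [] :: pvSplitSpec r := by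
  simp [pvSplitSpec]

theorem pvGoLemma (fuel : Nat) : ∀ (l cur : List Char) (accs : List (List Char)),
    l.length ≤ fuel →
    PySem.Chars.splitOn.go ['.'] fuel l cur accs =
      accs.reverse ++ ((cur.reverse ++ (pvSplitSpec l).headI) :: (pvSplitSpec l).tail) := by
  induction fuel with
  | zero =>
    intro l cur accs hl
    have hnil : l = [] := List.length_eq_zero_iff.mp (Nat.le_zero.mp hl)
    subst hnil
    rw [PySem.Chars.splitOn.go]
    simp [pvSplitSpec]
  | succ fuel ih =>
    intro l cur accs hl
    cases l with
    | nil =>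
      rw [PySem.Chars.splitOn.go]
      simp [pvSplitSpec]
      omega
    | cons c r =>
      rw [PySem.Chars.splitOn.go]
      by_cases hc : c = '.'
      · subst hc
        rw [if_pos (by simp [List.isPrefixOf])]
        have hdrop : List.drop (['.'] : List Char).length ('.' :: r) = r := by simp
        rw [hdrop, ih r [] (cur.reverse :: accs) (by simpa using hl), pvSplitSpec_dot]
        cases hS : pvSplitSpec r with
        | nil => exact absurd hS (pvSplitSpec_ne_nil r)
        | cons x xs => simp
      · have hp : (['.'].isPrefixOf (c :: r)) = false := by
          simp only [List.isPrefixOf, Bool.and_eq_false_iff, beq_eq_false_iff_ne, ne_eq]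
          exact Or.inl fun hh => hc hh.symm
        simp only [hp, Bool.false_eq_true, if_false]
        rw [ih r (c :: cur) accs (by simpa using hl)]
        cases hS : pvSplitSpec r with
        | nil => exact absurd hS (pvSplitSpec_ne_nil r)
        | cons x xs => simp [pvSplitSpec, hc, hS]

theorem pvSplitOn_eq (l : List Char) : PySem.Chars.splitOn l ['.'] = pvSplitSpec l := by
  unfold PySem.Chars.splitOn
  rw [pvGoLemma (l.length + 1) l [] [] (by omega)]
  cases hS : pvSplitSpec l with
  | nil => exact absurd hS (pvSplitSpec_ne_nil l)
  | cons x xs => simp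

theorem pvFoldlMap (xs : List (List Char)) (acc : List (List Char)) :
    xs.foldl (fun a p => a ++ [PySem.List.slice p none (some 1)]) acc
      = acc ++ xs.map (fun p => p.take 1) := by
  induction xs generalizing acc with
  | nil => simp
  | cons x xs ih =>
    simp only [List.foldl_cons, List.map_cons, ih]
    rw [PySem.List.slice_to (xs := x) (b := 1) (by norm_num)]
    simp

theorem pvSplitSpec_singleton (r : List Char) : ∀ x, pvSplitSpec r = [x] → x = r := by
  induction r with
  | nil =>
    intro x h
    simp [pvSplitSpec] at h
    exact h
  | cons c r ih =>
    intro x h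
    simp only [pvSplitSpec] at h
    split_ifs at h with hc
    · simp at h
      exact absurd h.2 (pvSplitSpec_ne_nil r)
    · cases hS : pvSplitSpec r with
      | nil => exact absurd hS (pvSplitSpec_ne_nil r)
      | cons y ys =>
        rw [hS] at h
        simp at h
        obtain ⟨hx, hys⟩ := h
        subst hys
        rw [← hx, ih y hS]

theorem pvSplitSpec_nodot (r : List Char) (h : '.' ∉ r) : pvSplitSpec r = [r] := by
  induction r with
  | nil => simp [pvSplitSpec]
  | cons c r ih =>
    have hc : c ≠ '.' := fun hh => h (hh ▸ List.mem_cons_self)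
    have hr : '.' ∉ r := fun hh => h (List.mem_cons_of_mem _ hh)
    simp [pvSplitSpec, hc, ih hr]

theorem pvSplitSpec_seg (seg : List Char) (r : List Char) (h : '.' ∉ seg) :
    pvSplitSpec (seg ++ '.' :: r) = seg :: pvSplitSpec r := by
  induction seg with
  | nil => simp [pvSplitSpec]
  | cons c seg ih =>
    have hc : c ≠ '.' := fun hh => h (hh ▸ List.mem_cons_self)
    have hs : '.' ∉ seg := fun hh => h (List.mem_cons_of_mem _ hh)
    simp only [List.cons_append, pvSplitSpec, hc, if_false, ih hs]

theorem pvDropWhileHead (p : Char → Bool) (l : List Char) (d : Char) (r : List Char)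
    (h : l.dropWhile p = d :: r) : p d = false := by
  induction l with
  | nil => simp at h
  | cons a l ih =>
    rw [List.dropWhile_cons] at h
    split_ifs at h with ha
    · exact ih h
    · cases h; simpa using ha

-- the tail expression A builds from the parts of r equals A's whole if-expression on r
theorem pvTailLemma (r : List Char) :
    PySem.Chars.join ['.'] (((pvSplitSpec r).dropLast).map (fun p => p.take 1)
        ++ List.drop ((pvSplitSpec r).length - 1) (pvSplitSpec r))
      = (if 1 < (pvSplitSpec r).length then
          PySem.Chars.join ['.'] (((pvSplitSpec r).dropLast).map (fun p => p.take 1)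
            ++ List.drop ((pvSplitSpec r).length - 1) (pvSplitSpec r))
         else r) := by
  by_cases h : 1 < (pvSplitSpec r).length
  · rw [if_pos h]
  · rw [if_neg h]
    cases hS : pvSplitSpec r with
    | nil => exact absurd hS (pvSplitSpec_ne_nil r)
    | cons x xs =>
      rw [hS] at h
      have hxs : xs = [] := by
        cases xs with
        | nil => rfl
        | cons y ys =>
          exfalso
          apply h
          simp only [List.length_cons]
          omega
      subst hxs
      rw [show ([x] : List (List Char)).dropLast = [] from rfl]
      simp only [List.map_nil, List.length_cons, List.length_nil, Nat.add_sub_cancel,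
        List.drop_zero, List.nil_append]
      rw [PySem.Chars.join_singleton]
      exact pvSplitSpec_singleton r x hS

theorem pvJoinConsE (a : List Char) (S : List (List Char)) (hS : S ≠ []) :
    PySem.Chars.join ['.'] (a :: ((S.dropLast).map (fun p => p.take 1)
        ++ List.drop (S.length - 1) S))
      = a ++ '.' :: PySem.Chars.join ['.'] ((S.dropLast).map (fun p => p.take 1)
        ++ List.drop (S.length - 1) S) := by
  have hlen : 0 < ((S.dropLast).map (fun p => p.take 1) ++ List.drop (S.length - 1) S).length := by
    rcases S with _ | ⟨x, xs⟩
    · exact absurd rfl hS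
    · simp
  cases hE : (S.dropLast).map (fun p => p.take 1) ++ List.drop (S.length - 1) S with
  | nil => rw [hE] at hlen; simp at hlen
  | cons y l' =>
    rw [PySem.Chars.join_cons_cons]
    simp

-- one dot-terminated step: A's if-expression on (a ++ '.' :: r) with '.' ∉ a
theorem pvHeadStep (a : List Char) (S : List (List Char)) (hS : S ≠ []) :
    (let parts := a :: S
     PySem.Chars.join ['.'] ((parts.dropLast).map (fun p => p.take 1)
       ++ List.drop (parts.length - 1) parts))
      = a.take 1 ++ '.' :: PySem.Chars.join ['.'] ((S.dropLast).map (fun p => p.take 1)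
          ++ List.drop (S.length - 1) S) := by
  have h0 : 0 < S.length := List.length_pos_iff.mpr hS
  simp only []
  rw [List.dropLast_cons_of_ne_nil hS, List.map_cons]
  rw [show (a :: S).length - 1 = (S.length - 1) + 1 by simp only [List.length_cons]; omega]
  rw [List.drop_succ_cons, List.cons_append]
  exact pvJoinConsE (a.take 1) S hS

theorem pvMainLemma (l : List Char) :
    (if 1 < (pvSplitSpec l).length then
      PySem.Chars.join ['.'] (((pvSplitSpec l).dropLast).map (fun p => p.take 1)
        ++ List.drop ((pvSplitSpec l).length - 1) (pvSplitSpec l))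
     else l) = pvScan l := by
  induction l using pvScan.induct with
  | case1 => simp [pvSplitSpec, pvScan]
  | case2 rest ih =>
    rw [pvScan, if_pos rfl]
    have h0 : 0 < (pvSplitSpec rest).length := List.length_pos_iff.mpr (pvSplitSpec_ne_nil rest)
    rw [pvSplitSpec_dot, if_pos (by simp only [List.length_cons]; omega)]
    rw [pvHeadStep [] (pvSplitSpec rest) (pvSplitSpec_ne_nil rest)]
    rw [pvTailLemma rest, ih]
    simp
  | case3 c rest hc h =>
    have hnr : '.' ∉ rest := by
      intro hm
      have := (List.dropWhile_eq_nil_iff.mp h) '.' hm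
      simp at this
    have hnl : '.' ∉ (c :: rest) := by
      intro hm
      rcases List.mem_cons.mp hm with h1 | h2
      · exact hc h1.symm
      · exact hnr h2
    rw [pvSplitSpec_nodot _ hnl, if_neg (by simp)]
    rw [pvScan, if_neg hc, h]
  | case4 c rest hc d rest' h ih =>
    have hseg : '.' ∉ rest.takeWhile (fun x => decide (x ≠ '.')) := by
      intro hm
      have := List.mem_takeWhile_imp hm
      simp at this
    have hrest : rest = rest.takeWhile (fun x => decide (x ≠ '.')) ++ '.' :: rest' := by
      conv_lhs => rw [← List.takeWhile_append_dropWhile (p := fun x => decide (x ≠ '.')) (l := rest)]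
      rw [h]
      have hd : d = '.' := by
        have := pvDropWhileHead _ _ _ _ h
        simpa using this
      rw [hd]
    have hnseg : '.' ∉ c :: rest.takeWhile (fun x => decide (x ≠ '.')) := by
      intro hm
      rcases List.mem_cons.mp hm with h1 | h2
      · exact hc h1.symm
      · exact hseg h2
    have hspec : pvSplitSpec (c :: rest)
        = (c :: rest.takeWhile (fun x => decide (x ≠ '.'))) :: pvSplitSpec rest' := by
      conv_lhs => rw [show (c :: rest) = (c :: rest.takeWhile (fun x => decide (x ≠ '.'))) ++ '.' :: rest' by rw [List.cons_append, ← hrest]]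
      exact pvSplitSpec_seg _ _ hnseg
    have h0 : 0 < (pvSplitSpec rest').length := List.length_pos_iff.mpr (pvSplitSpec_ne_nil rest')
    rw [hspec, if_pos (by simp only [List.length_cons]; omega)]
    rw [pvHeadStep _ (pvSplitSpec rest') (pvSplitSpec_ne_nil rest')]
    rw [pvTailLemma rest', ih]
    rw [pvScan, if_neg hc]
    split
    · rename_i heq
      rw [h] at heq
      simp at heq
    · rename_i d2 rest2 heq
      rw [h] at heq
      injection heq with h1 h2
      subst h2
      simp


-- ===== VERDICT (by name: the statement is the Claim_ definition above) =====
theorem shorten_module_name_py_spec : Claim_equal_shorten_module_name_py := by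
  intro name _
  unfold Spec_shorten_module_name_py shorten_module_name_py shorten_module_name_py_alt
  simp only [pvSplitOn_eq, PySem.List.slice_to_neg_one, PySem.List.slice_from_neg_one,
    pvFoldlMap, List.nil_append]
  rw [← pvMainLemma name.toList]
  split_ifs with h
  · rfl
  · exact String.ofList_toList.symm
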